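-- pv_equiv track=rewrite | github.com/tyjenkins12/ResearchPaperSummarizer | src/papersum/newsletter/tip_generator.py | _generate_data_type
-- ===== SOURCE A (Python) =====
-- from typing import List, Dict, Optional, Set
--
-- def _generate_data_type(keywords: List[str]) -> str:
--     if any('text' in k or 'nlp' in k for k in keywords):
--         return 'text data'
--     elif any('image' in k or 'vision' in k for k in keywords):
--         return 'image data'
--     elif any('time' in k or 'series' in k for k in keywords):
--         return 'time series data'
--     else:
--         return 'structured data'
-- ===== SOURCE B (Python) =====
-- _CATEGORIES = [
--     (("text", "nlp"), "text data"),
--     (("image", "vision"), "image data"),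
--     (("time", "series"), "time series data"),
-- ]
--
-- def _generate_data_type(keywords):
--     # One pass over keywords, tracking the best (lowest) category index seen.
--     best = len(_CATEGORIES)
--     for k in keywords:
--         for i, (subs, _label) in enumerate(_CATEGORIES):
--             if any(s in k for s in subs):
--                 best = min(best, i)
--                 break
--     if best < len(_CATEGORIES):
--         return _CATEGORIES[best][1]
--     return 'structured data'
-- ===== Notes on version B (the rewrite author's own statement) =====
-- stated objective: alternative
-- what changed: Replaced A's three sequential any-scans over the keyword list with a single pass over keywords that keeps the minimum priority index of the matching category from a data-driven category table.
import Mathlib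
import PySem

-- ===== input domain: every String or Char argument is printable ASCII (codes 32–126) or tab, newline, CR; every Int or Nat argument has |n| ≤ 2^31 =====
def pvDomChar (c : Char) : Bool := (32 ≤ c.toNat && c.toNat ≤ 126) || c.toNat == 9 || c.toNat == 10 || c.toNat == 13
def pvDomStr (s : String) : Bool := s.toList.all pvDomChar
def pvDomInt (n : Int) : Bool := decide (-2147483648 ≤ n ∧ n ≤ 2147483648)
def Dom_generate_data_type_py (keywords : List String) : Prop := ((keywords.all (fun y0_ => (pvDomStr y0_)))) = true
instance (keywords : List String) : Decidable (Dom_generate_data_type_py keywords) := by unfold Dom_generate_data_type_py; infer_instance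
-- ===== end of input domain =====

-- B replaces A's three sequential any-scans with a single pass over keywords
-- keeping the minimum matching category index from a data-driven table (objective: alternative).


-- ===== PORT A =====
def generate_data_type_py (keywords : List String) : String :=
  if keywords.any (fun k => PySem.Str.isIn "text" k || PySem.Str.isIn "nlp" k) then
    "text data"
  else if keywords.any (fun k => PySem.Str.isIn "image" k || PySem.Str.isIn "vision" k) then
    "image data"
  else if keywords.any (fun k => PySem.Str.isIn "time" k || PySem.Str.isIn "series" k) then
    "time series data"
  else
    "structured data"

-- ===== PORT B =====
def pvCats : List (List String × String) :=
  [(["text", "nlp"], "text data"),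
   (["image", "vision"], "image data"),
   (["time", "series"], "time series data")]

-- index of the first category whose substrings match k; cats.length if none
def pvMatchIdx (cats : List (List String × String)) (k : String) : Nat :=
  match cats with
  | [] => 0
  | (subs, _) :: rest =>
      if subs.any (fun s => PySem.Str.isIn s k) then 0 else pvMatchIdx rest k + 1

def generate_data_type_py_alt (keywords : List String) : String :=
  let best := keywords.foldl (fun b k => min b (pvMatchIdx pvCats k)) pvCats.length
  match pvCats[best]? with
  | some c => c.2
  | none => "structured data"

-- ===== PRECONDITION & SPEC =====
def Spec_generate_data_type_py (keywords : List String) (out : String) : Prop := out = generate_data_type_py_alt keywords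
instance (keywords : List String) (out : String) : Decidable (Spec_generate_data_type_py keywords out) := by unfold Spec_generate_data_type_py; infer_instance

-- ===== CLAIM (what is proved, stated in full; the proofs are below) =====
def Claim_equal_generate_data_type_py : Prop := ∀ (keywords : List String), Dom_generate_data_type_py keywords → Spec_generate_data_type_py keywords (generate_data_type_py keywords)

-- ===== LEMMAS AND PROOFS =====

-- the priority index A's if-chain corresponds to
def pvAIdx (keywords : List String) : Nat :=
  if keywords.any (fun k => PySem.Str.isIn "text" k || PySem.Str.isIn "nlp" k) then 0
  else if keywords.any (fun k => PySem.Str.isIn "image" k || PySem.Str.isIn "vision" k) then 1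
  else if keywords.any (fun k => PySem.Str.isIn "time" k || PySem.Str.isIn "series" k) then 2
  else 3

theorem pvAIdx_le (ks : List String) : pvAIdx ks ≤ 3 := by
  unfold pvAIdx; split_ifs <;> omega

theorem pvMatchIdx_cons (k : String) :
    pvMatchIdx pvCats k =
      if PySem.Str.isIn "text" k || PySem.Str.isIn "nlp" k then 0
      else if PySem.Str.isIn "image" k || PySem.Str.isIn "vision" k then 1
      else if PySem.Str.isIn "time" k || PySem.Str.isIn "series" k then 2
      else 3 := by
  simp [pvCats, pvMatchIdx, List.any]
  split_ifs <;> simp_all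

set_option maxHeartbeats 1000000 in
theorem pvAIdx_cons (k : String) (ks : List String) :
    pvAIdx (k :: ks) = min (pvMatchIdx pvCats k) (pvAIdx ks) := by
  rw [pvMatchIdx_cons]
  unfold pvAIdx
  simp only [List.any_cons]
  by_cases h1 : (PySem.Str.isIn "text" k || PySem.Str.isIn "nlp" k) = true <;>
  by_cases h2 : (PySem.Str.isIn "image" k || PySem.Str.isIn "vision" k) = true <;>
  by_cases h3 : (PySem.Str.isIn "time" k || PySem.Str.isIn "series" k) = true <;>
  by_cases h4 : (ks.any fun k => PySem.Str.isIn "text" k || PySem.Str.isIn "nlp" k) = true <;>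
  by_cases h5 : (ks.any fun k => PySem.Str.isIn "image" k || PySem.Str.isIn "vision" k) = true <;>
  by_cases h6 : (ks.any fun k => PySem.Str.isIn "time" k || PySem.Str.isIn "series" k) = true <;>
  simp only [h1, h2, h3, h4, h5, h6, Bool.or_true, Bool.or_false, if_true] <;>
  simp only [Bool.not_eq_true] at h1 h2 h3 h4 h5 h6 <;>
  simp [h2, h3, h5, h6]

theorem pvFold_eq (ks : List String) :
    ∀ b, b ≤ 3 → ks.foldl (fun b k => min b (pvMatchIdx pvCats k)) b = min b (pvAIdx ks) := by
  induction ks with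
  | nil => intro b hb; simp [pvAIdx]; omega
  | cons k ks ih =>
      intro b hb
      have h1 : min b (pvMatchIdx pvCats k) ≤ 3 := by omega
      rw [List.foldl_cons, ih _ h1, pvAIdx_cons]
      omega

theorem generate_data_type_py_spec' : ∀ ks, generate_data_type_py ks = generate_data_type_py_alt ks := by
  intro ks
  have h := pvFold_eq ks 3 (le_refl 3)
  have h3 : pvAIdx ks ≤ 3 := pvAIdx_le ks
  have h' : List.foldl (fun b k => min b (pvMatchIdx pvCats k)) pvCats.length ks = pvAIdx ks := by
    rw [show pvCats.length = 3 from rfl, h]; omega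
  simp only [generate_data_type_py_alt, h']
  unfold generate_data_type_py pvAIdx
  split_ifs <;> rfl

-- ===== VERDICT (by name: the statement is the Claim_ definition above) =====
theorem generate_data_type_py_spec : Claim_equal_generate_data_type_py := by
  intro ks _
  exact generate_data_type_py_spec' ks
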